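-- pv_equiv track=rewrite | github.com/chrkspln/algo_and_data_structures_course | src/BFSShortMinesPath.py | set_0
-- ===== SOURCE A (Python) =====
-- def set_0(grid: [[int]]) -> [[int]]:
--     mines_positions = []
--     for y in range(len(grid)):
--         for x in range(len(grid[0])):
--             if grid[y][x] == 0:
--                 mines_positions.append([y, x])
--     for position in mines_positions:
--         position_neighbors = get_neighbors(position, grid)
--         for y, x in position_neighbors:
--             grid[y][x] = 0
--     return grid
--
-- def get_neighbors(node: (int, int), grid: [[int]]) -> list:
--     y = node[0]
--     x = node[1]
--     neighboring_nodes = []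
--     # moving right
--     if x < len(grid[0]) - 1:
--         if grid[y][x + 1] == 1:
--             neighboring_nodes.append((y, x + 1))
--     # moving left
--     if x > 0:
--         if grid[y][x - 1] == 1:
--             neighboring_nodes.append((y, x - 1))
--     # moving down
--     if y < len(grid) - 1:
--         if grid[y + 1][x] == 1:
--             neighboring_nodes.append((y + 1, x))
--     # moving up
--     if y > 0:
--         if grid[y - 1][x] == 1:
--             neighboring_nodes.append((y - 1, x))
--     # taking diagonal nodes if were zeroing the grig
--     if grid[y][x] == 0:
--         if x > 0 and y > 0:
--             neighboring_nodes.append((y - 1, x - 1))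
--         if x > 0 and y < len(grid) - 1:
--             neighboring_nodes.append((y + 1, x - 1))
--         if (x < len(grid[0]) - 1) and y > 0:
--             neighboring_nodes.append((y - 1, x + 1))
--         if (x < len(grid[0]) - 1) and y < len(grid) - 1:
--             neighboring_nodes.append((y + 1, x + 1))
--
--     return neighboring_nodes
-- ===== SOURCE B (Python) =====
-- # B: gather-per-cell instead of A's scatter-from-zeros: build the set of initial
-- # zero coordinates once, then zero each cell from its own neighbourhood.
-- # Like A, mutates `grid` in place and returns it.
-- def set_0(grid):
--     h = len(grid)
--     w = len(grid[0])
--     zeros = {(y, x) for y in range(h) for x in range(w) if grid[y][x] == 0}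
--     for y in range(h):
--         for x in range(w):
--             if (y, x) in zeros:
--                 continue
--             if ((y - 1, x - 1) in zeros or (y + 1, x - 1) in zeros
--                     or (y - 1, x + 1) in zeros or (y + 1, x + 1) in zeros) \
--                or (grid[y][x] == 1 and ((y - 1, x) in zeros or (y + 1, x) in zeros
--                     or (y, x - 1) in zeros or (y, x + 1) in zeros)):
--                 grid[y][x] = 0
--     return grid
-- ===== Notes on version B (the rewrite author's own statement) =====
-- stated objective: alternative
-- what changed: A scatters: it collects zero cells and then, via get_neighbors on the mutating grid, writes 0 into their neighbors; B gathers: it builds the set of initial zero coordinates once and decides each cell locally (zero it if a diagonal neighbor was zero, or if it equals 1 and an orthogonal neighbor was zero).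
-- outside the precondition, e.g. on set_0([]): A returns [], B raises IndexError
import Mathlib
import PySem

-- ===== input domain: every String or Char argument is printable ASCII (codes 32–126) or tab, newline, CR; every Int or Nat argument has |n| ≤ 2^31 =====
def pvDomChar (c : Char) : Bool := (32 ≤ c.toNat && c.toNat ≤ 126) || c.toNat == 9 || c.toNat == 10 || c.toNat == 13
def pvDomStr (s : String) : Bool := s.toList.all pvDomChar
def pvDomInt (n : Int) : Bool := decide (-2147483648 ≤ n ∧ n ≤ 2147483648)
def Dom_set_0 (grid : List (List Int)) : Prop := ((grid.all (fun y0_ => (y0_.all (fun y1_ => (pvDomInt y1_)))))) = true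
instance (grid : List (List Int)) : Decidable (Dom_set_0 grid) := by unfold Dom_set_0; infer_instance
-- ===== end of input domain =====

-- B replaces A's scatter-from-zeros (interleaved in-place writes via get_neighbors) by a
-- one-pass gather per cell from the precomputed set of initial zero coordinates
-- (objective: alternative). Both Pythons mutate `grid` in place identically; the
-- equivalence proved here is about the return value.


-- ===== PORT A =====
-- grid[y][x]; inside Pre_ every read is in range, so the default never fires.
def pvCell (g : List (List Int)) (y x : Nat) : Int := (g.getD y []).getD x 0

-- A's first double loop: positions of the zero cells, in scan order
def pvMines (g : List (List Int)) : List (Nat × Nat) :=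
  (List.range g.length).flatMap (fun y =>
    (List.range (g.headD []).length).filterMap (fun x =>
      if pvCell g y x = 0 then some (y, x) else none))

-- grid[q.1][q.2] = 0 (in range inside Pre_, where Python's assignment succeeds)
def pvPut0 (g : List (List Int)) (q : Nat × Nat) : List (List Int) :=
  g.set q.1 ((g.getD q.1 []).set q.2 0)

-- literal get_neighbors: branches in source order, reading the CURRENT grid g;
-- len(grid) = g.length, len(grid[0]) = (g.headD []).length
def pvGnb (p : Nat × Nat) (g : List (List Int)) : List (Nat × Nat) :=
  (if p.2 + 1 < (g.headD []).length ∧ pvCell g p.1 (p.2+1) = 1 then [(p.1, p.2+1)] else []) ++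
  (if 0 < p.2 ∧ pvCell g p.1 (p.2-1) = 1 then [(p.1, p.2-1)] else []) ++
  (if p.1 + 1 < g.length ∧ pvCell g (p.1+1) p.2 = 1 then [(p.1+1, p.2)] else []) ++
  (if 0 < p.1 ∧ pvCell g (p.1-1) p.2 = 1 then [(p.1-1, p.2)] else []) ++
  (if pvCell g p.1 p.2 = 0 then
     (if 0 < p.2 ∧ 0 < p.1 then [(p.1-1, p.2-1)] else []) ++
     (if 0 < p.2 ∧ p.1+1 < g.length then [(p.1+1, p.2-1)] else []) ++
     (if p.2+1 < (g.headD []).length ∧ 0 < p.1 then [(p.1-1, p.2+1)] else []) ++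
     (if p.2+1 < (g.headD []).length ∧ p.1+1 < g.length then [(p.1+1, p.2+1)] else [])
   else [])

def set_0 (grid : List (List Int)) : List (List Int) :=
  (pvMines grid).foldl (fun g p => (pvGnb p g).foldl pvPut0 g) grid

-- ===== PORT B =====
-- Source B's set `zeros` as its list of distinct elements (Int coordinates, as in Python;
-- a shifted coordinate that is negative is simply never a member)
def pvZeros (g : List (List Int)) : List (Int × Int) :=
  (List.range g.length).flatMap (fun y =>
    (List.range (g.headD []).length).filterMap (fun x =>
      if (g.getD y []).getD x 0 = 0 then some ((y : Int), (x : Int)) else none))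

-- the gather loop of Source B; the outer `if x < w` = the inner loop only visits x ∈ range(w)
def set_0_alt (grid : List (List Int)) : List (List Int) :=
  grid.mapIdx (fun y row => row.mapIdx (fun x v =>
    if x < (grid.headD []).length then
      if ((y : Int), (x : Int)) ∈ pvZeros grid then v
      else if (((y:Int)-1, (x:Int)-1) ∈ pvZeros grid ∨ ((y:Int)+1, (x:Int)-1) ∈ pvZeros grid ∨
               ((y:Int)-1, (x:Int)+1) ∈ pvZeros grid ∨ ((y:Int)+1, (x:Int)+1) ∈ pvZeros grid) ∨
              (v = 1 ∧ (((y:Int)-1, (x:Int)) ∈ pvZeros grid ∨ ((y:Int)+1, (x:Int)) ∈ pvZeros grid ∨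
                        ((y:Int), (x:Int)-1) ∈ pvZeros grid ∨ ((y:Int), (x:Int)+1) ∈ pvZeros grid))
      then 0 else v
    else v))

-- ===== PRECONDITION & SPEC =====
-- Pre_ excludes the grids on which A raises IndexError (grid[0] or grid[y][x] out of range)
-- and the empty grid, where A happens to return [] only because its loop body that evaluates
-- grid[0] never runs, while B's natural eager len(grid[0]) raises IndexError there.
def Pre_set_0 (grid : List (List Int)) : Prop :=
  grid ≠ [] ∧ ∀ row ∈ grid, (grid.headD []).length ≤ row.length
instance (grid : List (List Int)) : Decidable (Pre_set_0 grid) := by unfold Pre_set_0; infer_instance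

def pvWitness_set_0 : List (List Int) := [[1, 1, 1], [1, 0, 1], [2, 1, 1]]

def Spec_set_0 (grid : List (List Int)) (out : List (List Int)) : Prop := out = set_0_alt grid
instance (grid : List (List Int)) (out : List (List Int)) : Decidable (Spec_set_0 grid out) := by unfold Spec_set_0; infer_instance

-- ===== CLAIM (what is proved, stated in full; the proofs are below) =====
def Claim_equal_set_0 : Prop := ∀ (grid : List (List Int)), Dom_set_0 grid → Pre_set_0 grid → Spec_set_0 grid (set_0 grid)

-- ===== LEMMAS AND PROOFS =====

-- Prop-level adjacency (diagonal / orthogonal), subtraction-free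
def adjD (p : Nat × Nat) (y x : Nat) : Prop :=
  (y = p.1 + 1 ∨ p.1 = y + 1) ∧ (x = p.2 + 1 ∨ p.2 = x + 1)
def adjO (p : Nat × Nat) (y x : Nat) : Prop :=
  (y = p.1 ∧ (x = p.2 + 1 ∨ p.2 = x + 1)) ∨ (x = p.2 ∧ (y = p.1 + 1 ∨ p.1 = y + 1))

-- "cell (y,x) ends up 0 because of the zero positions in P"
def pvAff (g0 : List (List Int)) (P : List (Nat × Nat)) (y x : Nat) : Prop :=
  y < g0.length ∧ x < (g0.headD []).length ∧
  ∃ p ∈ P, adjD p y x ∨ (pvCell g0 y x = 1 ∧ adjO p y x)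

-- loop invariant of A's outer fold
def pvInv (g0 : List (List Int)) (P : List (Nat × Nat)) (g : List (List Int)) : Prop :=
  g.length = g0.length ∧
  (∀ i, (g.getD i []).length = (g0.getD i []).length) ∧
  (∀ y x, (pvAff g0 P y x → pvCell g y x = 0) ∧ (¬ pvAff g0 P y x → pvCell g y x = pvCell g0 y x))

theorem mem_if_singleton {α : Type} (c : Prop) [Decidable c] (a b : α) :
    (a ∈ if c then [b] else []) ↔ c ∧ a = b := by
  split_ifs with h <;> simp [h]

theorem headD_len (g : List (List Int)) : (g.headD []).length = (g.getD 0 []).length := by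
  cases g <;> simp

theorem getD_eq_getElem' {α : Type} (l : List α) (i : Nat) (d : α) (h : i < l.length) :
    l.getD i d = l[i] := by
  simp [List.getD_eq_getElem?_getD, h]

theorem cell_eq_getElem (g : List (List Int)) (y x : Nat) (hy : y < g.length)
    (hx : x < (g[y]).length) : pvCell g y x = g[y][x] := by
  unfold pvCell
  rw [getD_eq_getElem' g y [] hy, getD_eq_getElem' _ x 0 hx]

theorem getD_set {α : Type} (l : List α) (i : Nat) (a : α) (j : Nat) (d : α) :
    (l.set i a).getD j d = if i = j ∧ i < l.length then a else l.getD j d := by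
  by_cases h : i = j
  · subst h
    by_cases hl : i < l.length
    · simp [List.getD_eq_getElem?_getD, hl]
    · have : l[i]? = none := List.getElem?_eq_none (by omega)
      simp [List.getD_eq_getElem?_getD, hl]
  · simp [List.getD_eq_getElem?_getD, h]

theorem len_put0 (g : List (List Int)) (q : Nat × Nat) : (pvPut0 g q).length = g.length := by
  simp [pvPut0]

theorem rowlen_put0 (g : List (List Int)) (q : Nat × Nat) (i : Nat) :
    ((pvPut0 g q).getD i []).length = (g.getD i []).length := by
  unfold pvPut0
  rw [getD_set]
  split_ifs with h
  · rw [List.length_set, ← h.1]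
  · rfl

theorem cell_put0 (g : List (List Int)) (q : Nat × Nat) (y x : Nat) :
    pvCell (pvPut0 g q) y x =
      if q.1 = y ∧ q.2 = x ∧ q.1 < g.length ∧ q.2 < (g.getD q.1 []).length then 0
      else pvCell g y x := by
  unfold pvPut0 pvCell
  rw [getD_set]
  by_cases h : q.1 = y ∧ q.1 < g.length
  · rw [if_pos h, getD_set]
    obtain ⟨h1, h2⟩ := h
    subst h1
    by_cases hx : q.2 = x ∧ q.2 < (g.getD q.1 []).length
    · simp [hx.1, h2]
    · rw [if_neg hx, if_neg (by tauto)]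
  · rw [if_neg h, if_neg (by tauto)]

theorem len_foldPut (L : List (Nat × Nat)) (g : List (List Int)) :
    (L.foldl pvPut0 g).length = g.length := by
  induction L generalizing g with
  | nil => rfl
  | cons q L ih => rw [List.foldl_cons, ih, len_put0]

theorem rowlen_foldPut (L : List (Nat × Nat)) (g : List (List Int)) (i : Nat) :
    ((L.foldl pvPut0 g).getD i []).length = (g.getD i []).length := by
  induction L generalizing g with
  | nil => rfl
  | cons q L ih => rw [List.foldl_cons, ih, rowlen_put0]

theorem cell_foldPut (L : List (Nat × Nat)) (g : List (List Int))
    (hb : ∀ q ∈ L, q.1 < g.length ∧ q.2 < (g.getD q.1 []).length) (y x : Nat) :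
    pvCell (L.foldl pvPut0 g) y x = if (y, x) ∈ L then 0 else pvCell g y x := by
  induction L generalizing g with
  | nil => simp
  | cons q L ih =>
      have hq := hb q (by simp)
      have hb' : ∀ r ∈ L, r.1 < (pvPut0 g q).length ∧ r.2 < ((pvPut0 g q).getD r.1 []).length := by
        intro r hr
        have h := hb r (by simp [hr])
        exact ⟨by rw [len_put0]; exact h.1, by rw [rowlen_put0]; exact h.2⟩
      rw [List.foldl_cons, ih _ hb', cell_put0]
      by_cases hm : (y, x) ∈ L
      · simp [hm]
      · by_cases he : (y, x) = q
        · subst he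
          rw [if_neg hm, if_pos ⟨rfl, rfl, hq.1, hq.2⟩, if_pos (show (y, x) ∈ (y, x) :: L by simp)]
        · have hcond : ¬ (q.1 = y ∧ q.2 = x ∧ q.1 < g.length ∧ q.2 < (g.getD q.1 []).length) := by
            rintro ⟨a, b, _⟩
            exact he (by rw [← a, ← b])
          rw [if_neg hm, if_neg hcond, if_neg (show ¬ (y, x) ∈ q :: L by simp [he, hm])]

theorem mem_mines (g0 : List (List Int)) (y x : Nat) :
    (y, x) ∈ pvMines g0 ↔
      y < g0.length ∧ x < (g0.headD []).length ∧ pvCell g0 y x = 0 := by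
  simp only [pvMines, List.mem_flatMap, List.mem_filterMap, List.mem_range]
  constructor
  · rintro ⟨a, ha, b, hb, h⟩
    split_ifs at h with hc
    · simp only [Option.some.injEq, Prod.mk.injEq] at h
      obtain ⟨rfl, rfl⟩ := h
      exact ⟨ha, hb, hc⟩
  · rintro ⟨hy, hx, hc⟩
    exact ⟨y, hy, x, hx, by simp [hc]⟩

theorem mem_zeros (g0 : List (List Int)) (u v : Int) :
    (u, v) ∈ pvZeros g0 ↔
      ∃ y x : Nat, y < g0.length ∧ x < (g0.headD []).length ∧
        u = (y : Int) ∧ v = (x : Int) ∧ pvCell g0 y x = 0 := by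
  simp only [pvZeros, List.mem_flatMap, List.mem_filterMap, List.mem_range]
  constructor
  · rintro ⟨a, ha, b, hb, h⟩
    split_ifs at h with hc
    · simp only [Option.some.injEq, Prod.mk.injEq] at h
      exact ⟨a, b, ha, hb, h.1.symm, h.2.symm, hc⟩
  · rintro ⟨y, x, hy, hx, rfl, rfl, hc⟩
    exact ⟨y, hy, x, hx, by simp [pvCell] at hc ⊢; exact hc⟩

-- membership in get_neighbors on the current grid g, at a currently-zero in-bounds p
theorem mem_gnb (g : List (List Int)) (p : Nat × Nat) (y x : Nat)
    (hp : p.1 < g.length ∧ p.2 < (g.headD []).length)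
    (hc : pvCell g p.1 p.2 = 0) :
    ((y, x) ∈ pvGnb p g) ↔
      (y < g.length ∧ x < (g.headD []).length ∧
        (adjD p y x ∨ (adjO p y x ∧ pvCell g y x = 1))) := by
  obtain ⟨py, px⟩ := p
  obtain ⟨hp1, hp2⟩ := hp
  simp only at hp1 hp2
  simp only at hc
  unfold adjD adjO
  simp only [pvGnb, List.mem_append, mem_if_singleton, if_pos hc, Prod.mk.injEq]
  constructor
  · rintro ((((⟨⟨hg, hv⟩, rfl, rfl⟩ | ⟨⟨hg, hv⟩, rfl, rfl⟩) | ⟨⟨hg, hv⟩, rfl, rfl⟩) |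
        ⟨⟨hg, hv⟩, rfl, rfl⟩) |
      (((⟨⟨h1, h2⟩, rfl, rfl⟩ | ⟨⟨h1, h2⟩, rfl, rfl⟩) | ⟨⟨h1, h2⟩, rfl, rfl⟩) |
        ⟨⟨h1, h2⟩, rfl, rfl⟩))
    · exact ⟨hp1, hg, Or.inr ⟨Or.inl ⟨rfl, Or.inl rfl⟩, hv⟩⟩
    · exact ⟨hp1, by omega, Or.inr ⟨Or.inl ⟨rfl, Or.inr (by omega)⟩, hv⟩⟩
    · exact ⟨hg, hp2, Or.inr ⟨Or.inr ⟨rfl, Or.inl rfl⟩, hv⟩⟩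
    · exact ⟨by omega, hp2, Or.inr ⟨Or.inr ⟨rfl, Or.inr (by omega)⟩, hv⟩⟩
    · exact ⟨by omega, by omega, Or.inl ⟨Or.inr (by omega), Or.inr (by omega)⟩⟩
    · exact ⟨h2, by omega, Or.inl ⟨Or.inl rfl, Or.inr (by omega)⟩⟩
    · exact ⟨by omega, h1, Or.inl ⟨Or.inr (by omega), Or.inl rfl⟩⟩
    · exact ⟨h2, h1, Or.inl ⟨Or.inl rfl, Or.inl rfl⟩⟩
  · rintro ⟨hy, hx, (⟨hd1 | hd1, hd2 | hd2⟩ |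
      ⟨⟨rfl, rfl | ho⟩ | ⟨rfl, rfl | ho⟩, hv⟩)⟩
    · exact Or.inr (Or.inr ⟨⟨by omega, by omega⟩, by omega, by omega⟩)
    · exact Or.inr (Or.inl (Or.inl (Or.inr ⟨⟨by omega, by omega⟩, by omega, by omega⟩)))
    · exact Or.inr (Or.inl (Or.inr ⟨⟨by omega, by omega⟩, by omega, by omega⟩))
    · exact Or.inr (Or.inl (Or.inl (Or.inl ⟨⟨by omega, by omega⟩, by omega, by omega⟩)))
    · exact Or.inl (Or.inl (Or.inl (Or.inl ⟨⟨by omega, hv⟩, rfl, rfl⟩)))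
    · exact Or.inl (Or.inl (Or.inl (Or.inr ⟨⟨by omega,
        by rw [show px - 1 = x from by omega]; exact hv⟩, rfl, by omega⟩)))
    · exact Or.inl (Or.inl (Or.inr ⟨⟨by omega, hv⟩, rfl, rfl⟩))
    · exact Or.inl (Or.inr ⟨⟨by omega,
        by rw [show py - 1 = y from by omega]; exact hv⟩, by omega, rfl⟩)

theorem aff_snoc (g0 : List (List Int)) (P : List (Nat × Nat)) (p : Nat × Nat) (y x : Nat) :
    pvAff g0 (P ++ [p]) y x ↔
      pvAff g0 P y x ∨
      (y < g0.length ∧ x < (g0.headD []).length ∧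
        (adjD p y x ∨ (pvCell g0 y x = 1 ∧ adjO p y x))) := by
  simp only [pvAff, List.mem_append, List.mem_singleton]
  constructor
  · rintro ⟨h1, h2, q, hq | rfl, h3⟩
    · exact Or.inl ⟨h1, h2, q, hq, h3⟩
    · exact Or.inr ⟨h1, h2, h3⟩
  · rintro (⟨h1, h2, q, hq, h3⟩ | ⟨h1, h2, h3⟩)
    · exact ⟨h1, h2, q, Or.inl hq, h3⟩
    · exact ⟨h1, h2, p, Or.inr rfl, h3⟩

theorem step_inv (g0 : List (List Int)) (hpre : Pre_set_0 g0)
    (P : List (Nat × Nat)) (p : Nat × Nat) (g : List (List Int))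
    (hp : p.1 < g0.length ∧ p.2 < (g0.headD []).length ∧ pvCell g0 p.1 p.2 = 0)
    (hinv : pvInv g0 P g) :
    pvInv g0 (P ++ [p]) ((pvGnb p g).foldl pvPut0 g) := by
  obtain ⟨hlen, hrow, hcells⟩ := hinv
  have hw : (g.headD []).length = (g0.headD []).length := by
    rw [headD_len, headD_len, hrow 0]
  have hrowlen : ∀ i, i < g0.length → (g0.headD []).length ≤ (g0.getD i []).length := by
    intro i hi
    exact hpre.2 _ (getD_eq_getElem' g0 i [] hi ▸ List.getElem_mem hi)
  have hcp : pvCell g p.1 p.2 = 0 := by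
    by_cases haff : pvAff g0 P p.1 p.2
    · exact (hcells p.1 p.2).1 haff
    · rw [(hcells p.1 p.2).2 haff]; exact hp.2.2
  have hb : ∀ q ∈ pvGnb p g, q.1 < g.length ∧ q.2 < (g.getD q.1 []).length := by
    rintro ⟨qy, qx⟩ hq
    have h := (mem_gnb g p qy qx ⟨by omega, by omega⟩ hcp).1 hq
    refine ⟨h.1, ?_⟩
    rw [hrow qy]
    have := hrowlen qy (by omega)
    omega
  refine ⟨by rw [len_foldPut]; exact hlen, by intro i; rw [rowlen_foldPut]; exact hrow i, ?_⟩
  intro y x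
  rw [cell_foldPut _ _ hb y x]
  have hgnb := mem_gnb g p y x ⟨by omega, by omega⟩ hcp
  constructor
  · intro haff
    rcases (aff_snoc g0 P p y x).1 haff with hP | ⟨hy, hx, hcase⟩
    · by_cases hm : (y, x) ∈ pvGnb p g
      · rw [if_pos hm]
      · rw [if_neg hm]; exact (hcells y x).1 hP
    · by_cases hm : (y, x) ∈ pvGnb p g
      · rw [if_pos hm]
      · rw [if_neg hm]
        rcases hcase with hd | ⟨hv1, ho⟩
        · exact absurd (hgnb.2 ⟨by omega, by omega, Or.inl hd⟩) hm
        · by_cases hP' : pvAff g0 P y x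
          · exact (hcells y x).1 hP'
          · have hcur : pvCell g y x = 1 := by rw [(hcells y x).2 hP']; exact hv1
            exact absurd (hgnb.2 ⟨by omega, by omega, Or.inr ⟨ho, hcur⟩⟩) hm
  · intro haff
    have hP : ¬ pvAff g0 P y x := fun h => haff ((aff_snoc g0 P p y x).2 (Or.inl h))
    have hm : (y, x) ∉ pvGnb p g := by
      intro hm
      rcases (hgnb.1 hm) with ⟨hyb, hxb, hd | ⟨ho, hv⟩⟩
      · exact haff ((aff_snoc g0 P p y x).2 (Or.inr ⟨by omega, by omega, Or.inl hd⟩))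
      · have hv0 : pvCell g0 y x = 1 := by rw [← (hcells y x).2 hP]; exact hv
        exact haff ((aff_snoc g0 P p y x).2 (Or.inr ⟨by omega, by omega, Or.inr ⟨hv0, ho⟩⟩))
    rw [if_neg hm]
    exact (hcells y x).2 hP

theorem fold_inv (g0 : List (List Int)) (hpre : Pre_set_0 g0) :
    ∀ (Q : List (Nat × Nat)) (P : List (Nat × Nat)) (g : List (List Int)),
      (∀ p ∈ Q, p.1 < g0.length ∧ p.2 < (g0.headD []).length ∧ pvCell g0 p.1 p.2 = 0) →
      pvInv g0 P g →
      pvInv g0 (P ++ Q) (Q.foldl (fun g p => (pvGnb p g).foldl pvPut0 g) g) := by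
  intro Q
  induction Q with
  | nil => intro P g _ h; simpa using h
  | cons q Q ih =>
      intro P g hQ hinv
      have h1 := step_inv g0 hpre P q g (hQ q (by simp)) hinv
      have h2 := ih (P ++ [q]) _ (fun p hp => hQ p (by simp [hp])) h1
      simpa [List.append_assoc] using h2

theorem inv_final (g0 : List (List Int)) (hpre : Pre_set_0 g0) :
    pvInv g0 (pvMines g0) (set_0 g0) := by
  have h0 : pvInv g0 [] g0 := by
    refine ⟨rfl, fun i => rfl, fun y x => ⟨?_, fun _ => rfl⟩⟩
    intro h
    exact absurd h.2.2 (by simp)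
  have := fold_inv g0 hpre (pvMines g0) [] g0
    (fun p hp => (mem_mines g0 p.1 p.2).1 hp) h0
  simpa [set_0] using this

-- the pointwise bridge: A's "affected" ↔ B's gather condition
theorem aff_iff_gather (g0 : List (List Int)) (y x : Nat)
    (hy : y < g0.length) (hx : x < (g0.headD []).length) :
    pvAff g0 (pvMines g0) y x ↔
      ((((y : Int) - 1, (x : Int) - 1) ∈ pvZeros g0 ∨ ((y : Int) + 1, (x : Int) - 1) ∈ pvZeros g0 ∨
        ((y : Int) - 1, (x : Int) + 1) ∈ pvZeros g0 ∨ ((y : Int) + 1, (x : Int) + 1) ∈ pvZeros g0) ∨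
       (pvCell g0 y x = 1 ∧
        (((y : Int) - 1, (x : Int)) ∈ pvZeros g0 ∨ ((y : Int) + 1, (x : Int)) ∈ pvZeros g0 ∨
         ((y : Int), (x : Int) - 1) ∈ pvZeros g0 ∨ ((y : Int), (x : Int) + 1) ∈ pvZeros g0))) := by
  unfold pvAff adjD adjO
  constructor
  · rintro ⟨-, -, p, hp, ⟨hd1 | hd1, hd2 | hd2⟩ | ⟨hv, ⟨hoy, ho | ho⟩ | ⟨hox, ho | ho⟩⟩⟩ <;>
      obtain ⟨hp1, hp2, hp0⟩ := (mem_mines g0 p.1 p.2).1 hp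
    · exact Or.inl (Or.inl ((mem_zeros g0 _ _).2 ⟨p.1, p.2, hp1, hp2, by omega, by omega, hp0⟩))
    · exact Or.inl (Or.inr (Or.inr (Or.inl ((mem_zeros g0 _ _).2 ⟨p.1, p.2, hp1, hp2, by omega, by omega, hp0⟩))))
    · exact Or.inl (Or.inr (Or.inl ((mem_zeros g0 _ _).2 ⟨p.1, p.2, hp1, hp2, by omega, by omega, hp0⟩)))
    · exact Or.inl (Or.inr (Or.inr (Or.inr ((mem_zeros g0 _ _).2 ⟨p.1, p.2, hp1, hp2, by omega, by omega, hp0⟩))))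
    · exact Or.inr ⟨hv, Or.inr (Or.inr (Or.inl ((mem_zeros g0 _ _).2 ⟨p.1, p.2, hp1, hp2, by omega, by omega, hp0⟩)))⟩
    · exact Or.inr ⟨hv, Or.inr (Or.inr (Or.inr ((mem_zeros g0 _ _).2 ⟨p.1, p.2, hp1, hp2, by omega, by omega, hp0⟩)))⟩
    · exact Or.inr ⟨hv, Or.inl ((mem_zeros g0 _ _).2 ⟨p.1, p.2, hp1, hp2, by omega, by omega, hp0⟩)⟩
    · exact Or.inr ⟨hv, Or.inr (Or.inl ((mem_zeros g0 _ _).2 ⟨p.1, p.2, hp1, hp2, by omega, by omega, hp0⟩))⟩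
  · rintro ((hm | hm | hm | hm) | ⟨hv, hm | hm | hm | hm⟩) <;>
      obtain ⟨y', x', h1, h2, e1, e2, hc⟩ := (mem_zeros g0 _ _).1 hm <;>
      refine ⟨hy, hx, (y', x'), (mem_mines g0 y' x').2 ⟨h1, h2, hc⟩, ?_⟩
    · exact Or.inl ⟨by omega, by omega⟩
    · exact Or.inl ⟨by omega, by omega⟩
    · exact Or.inl ⟨by omega, by omega⟩
    · exact Or.inl ⟨by omega, by omega⟩
    · exact Or.inr ⟨hv, by omega⟩
    · exact Or.inr ⟨hv, by omega⟩
    · exact Or.inr ⟨hv, by omega⟩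
    · exact Or.inr ⟨hv, by omega⟩

theorem zeros_self (g0 : List (List Int)) (y x : Nat)
    (hy : y < g0.length) (hx : x < (g0.headD []).length) :
    (((y : Int)), ((x : Int))) ∈ pvZeros g0 ↔ pvCell g0 y x = 0 := by
  rw [mem_zeros]
  constructor
  · rintro ⟨y', x', _, _, e1, e2, hc⟩
    have : y' = y ∧ x' = x := by omega
    rw [← this.1, ← this.2]; exact hc
  · intro hc
    exact ⟨y, x, hy, hx, rfl, rfl, hc⟩

theorem set_0_eq_alt (g0 : List (List Int)) (hpre : Pre_set_0 g0) :
    set_0 g0 = set_0_alt g0 := by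
  obtain ⟨hlen, hrow, hcells⟩ := inv_final g0 hpre
  unfold set_0_alt
  apply List.ext_getElem
  · rw [List.length_mapIdx]; exact hlen
  · intro y h1 h2
    have hyg : y < g0.length := hlen ▸ h1
    rw [List.getElem_mapIdx]
    apply List.ext_getElem
    · rw [List.length_mapIdx, ← getD_eq_getElem' _ y ([] : List Int) h1, hrow y,
        getD_eq_getElem' g0 y ([] : List Int) hyg]
    · intro x hx1 hx2
      rw [List.getElem_mapIdx]
      have hxg : x < g0[y].length := by rw [List.length_mapIdx] at hx2; exact hx2
      rw [← cell_eq_getElem (set_0 g0) y x h1 hx1, ← cell_eq_getElem g0 y x hyg hxg]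
      by_cases hxw : x < (g0.headD []).length
      · rw [if_pos hxw]
        by_cases hz : pvCell g0 y x = 0
        · rw [if_pos ((zeros_self g0 y x hyg hxw).2 hz)]
          by_cases haff : pvAff g0 (pvMines g0) y x
          · rw [(hcells y x).1 haff, hz]
          · exact (hcells y x).2 haff
        · rw [if_neg (fun hm => hz ((zeros_self g0 y x hyg hxw).1 hm))]
          by_cases haff : pvAff g0 (pvMines g0) y x
          · rw [if_pos ((aff_iff_gather g0 y x hyg hxw).1 haff), (hcells y x).1 haff]
          · rw [if_neg (fun hg => haff ((aff_iff_gather g0 y x hyg hxw).2 hg))]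
            exact (hcells y x).2 haff
      · rw [if_neg hxw]
        exact (hcells y x).2 (fun haff => hxw haff.2.1)

-- ===== VERDICT (by name: the statement is the Claim_ definition above) =====
theorem set_0_spec : Claim_equal_set_0 := by
  intro grid _ hpre
  unfold Spec_set_0
  exact set_0_eq_alt grid hpre
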